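-- pv_equiv track=rewrite | github.com/Quartyom/LayThePath | artefacts/distribution.py | get_distr_arr
-- ===== SOURCE A (Python) =====
-- def get_distr_arr(n_from, n_to):
--     mid_range = int((n_from + n_to) * 0.5)
--
--     incr = mid_range - n_from
--
--     arr = []
--
--     for i in range(n_from, mid_range + 1):
--         arr += [i] * incr
--         incr += 1
--
--     if (n_to-n_from)%2 == 0:
--         incr -= 2
--     else:
--         incr -= 1
--     for i in range(mid_range + 1, n_to + 1):
--         arr += [i] * incr
--         incr -= 1
--
--     return arr
-- ===== SOURCE B (Python) =====
-- def get_distr_arr(n_from, n_to):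
--     # closed-form tent height per value instead of two stateful counter loops
--     mid_range = int((n_from + n_to) * 0.5)
--     e = mid_range - n_from
--     p = (n_to - n_from) % 2
--     arr = []
--     for i in range(n_from, n_to + 1):
--         arr += [i] * (2 * e - max(mid_range - i, i - mid_range - p, 0))
--     return arr
-- ===== Notes on version B (the rewrite author's own statement) =====
-- stated objective: simpler
-- what changed: Replaces A's two stateful counter loops (incr incremented, then adjusted and decremented) by a single loop over the whole range that emits each value with a closed-form tent height 2*e - max(mid-i, i-mid-parity, 0).
import Mathlib
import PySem

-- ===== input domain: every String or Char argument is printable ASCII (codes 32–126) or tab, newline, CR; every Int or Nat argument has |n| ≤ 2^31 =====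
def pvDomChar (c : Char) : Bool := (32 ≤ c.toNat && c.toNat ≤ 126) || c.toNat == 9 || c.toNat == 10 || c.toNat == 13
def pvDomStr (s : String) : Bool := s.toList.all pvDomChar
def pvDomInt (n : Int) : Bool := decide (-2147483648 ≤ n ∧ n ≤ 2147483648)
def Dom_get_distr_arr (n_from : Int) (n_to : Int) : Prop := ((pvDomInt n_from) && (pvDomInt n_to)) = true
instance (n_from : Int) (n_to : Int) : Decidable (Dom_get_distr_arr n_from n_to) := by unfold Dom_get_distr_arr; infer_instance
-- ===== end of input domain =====

-- B replaces A's two stateful counter loops by one loop emitting a closed-form tent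
-- height per value (objective: simpler; same cost).

-- ===== PORT A =====
-- int((n_from + n_to) * 0.5): on Dom the sum has |·| ≤ 2^32, so the double is exact and
-- multiplication by 0.5 is exact; int() then truncates toward zero, i.e. Int.tdiv _ 2 (exact on Dom).
def get_distr_arr (n_from : Int) (n_to : Int) : List Int :=
  let mid_range := Int.tdiv (n_from + n_to) 2
  let s1 := (PySem.List.pyRange n_from (mid_range + 1) 1).foldl
    (fun (s : List Int × Int) i => (s.1 ++ List.replicate s.2.toNat i, s.2 + 1))
    ([], mid_range - n_from)
  let incr2 := if PySem.Int.mod (n_to - n_from) 2 = 0 then s1.2 - 2 else s1.2 - 1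
  let s2 := (PySem.List.pyRange (mid_range + 1) (n_to + 1) 1).foldl
    (fun (s : List Int × Int) i => (s.1 ++ List.replicate s.2.toNat i, s.2 - 1))
    (s1.1, incr2)
  s2.1

-- ===== PORT B =====
-- same midpoint computation (exact on Dom, see above); `[i] * c` is replicate of c.toNat
def get_distr_arr_alt (n_from : Int) (n_to : Int) : List Int :=
  let mid_range := Int.tdiv (n_from + n_to) 2
  let e := mid_range - n_from
  let p := PySem.Int.mod (n_to - n_from) 2
  (PySem.List.pyRange n_from (n_to + 1) 1).foldl
    (fun arr i =>
      arr ++ List.replicate (2 * e - max (max (mid_range - i) (i - mid_range - p)) 0).toNat i)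
    []

-- ===== PRECONDITION & SPEC =====
def Spec_get_distr_arr (n_from : Int) (n_to : Int) (out : List Int) : Prop := out = get_distr_arr_alt n_from n_to
instance (n_from : Int) (n_to : Int) (out : List Int) : Decidable (Spec_get_distr_arr n_from n_to out) := by unfold Spec_get_distr_arr; infer_instance

-- ===== CLAIM (what is proved, stated in full; the proofs are below) =====
def Claim_equal_get_distr_arr : Prop := ∀ (n_from : Int) (n_to : Int), Dom_get_distr_arr n_from n_to → Spec_get_distr_arr n_from n_to (get_distr_arr n_from n_to)

-- ===== LEMMAS AND PROOFS =====

lemma pv_flatMap_congr_mem {α β : Type} (l : List α) (f g : α → List β)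
    (h : ∀ x ∈ l, f x = g x) : l.flatMap f = l.flatMap g := by
  induction l with
  | nil => rfl
  | cons x xs ih =>
    simp only [List.flatMap_cons]
    rw [h x (by simp), ih (fun y hy => h y (by simp [hy]))]

lemma pv_flatMap_nil {α β : Type} (l : List α) (f : α → List β)
    (h : ∀ x ∈ l, f x = []) : l.flatMap f = [] := by
  rw [pv_flatMap_congr_mem l f (fun _ => []) h]; simp

-- A's first loop: counter goes up by 1 each step
lemma pv_phase_up (n : Nat) : ∀ (a b c : Int) (acc : List Int), (b - a).toNat = n →
    ((PySem.List.pyRange a b 1).foldl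
      (fun (s : List Int × Int) i => (s.1 ++ List.replicate s.2.toNat i, s.2 + 1)) (acc, c))
    = (acc ++ (PySem.List.pyRange a b 1).flatMap (fun i => List.replicate (c + (i - a)).toNat i),
       c + (n : Int)) := by
  induction n with
  | zero =>
    intro a b c acc h
    rw [PySem.List.pyRange_one_eq_nil (by omega)]
    simp
  | succ k ih =>
    intro a b c acc h
    rw [PySem.List.pyRange_one_cons (by omega)]
    simp only [List.foldl_cons, List.flatMap_cons]
    rw [ih (a + 1) b (c + 1) (acc ++ List.replicate c.toNat a) (by omega)]
    have hfun : (fun i : Int => List.replicate (c + 1 + (i - (a + 1))).toNat i)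
        = (fun i : Int => List.replicate (c + (i - a)).toNat i) := by
      funext i; congr 1; omega
    rw [hfun]
    refine Prod.ext ?_ (by push_cast; ring)
    simp only [sub_self, add_zero, List.append_assoc]

-- A's second loop: counter goes down by 1 each step
lemma pv_phase_down (n : Nat) : ∀ (a b c : Int) (acc : List Int), (b - a).toNat = n →
    ((PySem.List.pyRange a b 1).foldl
      (fun (s : List Int × Int) i => (s.1 ++ List.replicate s.2.toNat i, s.2 - 1)) (acc, c))
    = (acc ++ (PySem.List.pyRange a b 1).flatMap (fun i => List.replicate (c - (i - a)).toNat i),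
       c - (n : Int)) := by
  induction n with
  | zero =>
    intro a b c acc h
    rw [PySem.List.pyRange_one_eq_nil (by omega)]
    simp
  | succ k ih =>
    intro a b c acc h
    rw [PySem.List.pyRange_one_cons (by omega)]
    simp only [List.foldl_cons, List.flatMap_cons]
    rw [ih (a + 1) b (c - 1) (acc ++ List.replicate c.toNat a) (by omega)]
    have hfun : (fun i : Int => List.replicate (c - 1 - (i - (a + 1))).toNat i)
        = (fun i : Int => List.replicate (c - (i - a)).toNat i) := by
      funext i; congr 1; omega
    rw [hfun]
    refine Prod.ext ?_ (by push_cast; ring)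
    simp only [sub_self, sub_zero, List.append_assoc]

theorem get_distr_arr_spec : Claim_equal_get_distr_arr := by
  intro f t _
  unfold Spec_get_distr_arr get_distr_arr get_distr_arr_alt
  dsimp only
  set mid := Int.tdiv (f + t) 2 with hmiddef
  -- characterise mid for omega: (f+t) = 2*mid + r with r the truncating remainder
  have hchar : f + t = 2 * mid + (f + t).tmod 2 := by
    rw [hmiddef]
    have := Int.mul_tdiv_add_tmod (f + t) 2
    omega
  have hr : (f + t).tmod 2 = -1 ∨ (f + t).tmod 2 = 0 ∨ (f + t).tmod 2 = 1 :=
    Int.tmod_two_eq (f + t)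
  have hrsign : (0 ≤ f + t → 0 ≤ (f + t).tmod 2) ∧ (f + t ≤ 0 → (f + t).tmod 2 ≤ 0) := by
    constructor
    · intro h; exact Int.tmod_nonneg (a := f + t) 2 h
    · intro h
      have h2 : (0 : Int) ≤ -(f + t) := by omega
      have h3 := Int.tmod_nonneg (a := -(f + t)) 2 h2
      rw [Int.neg_tmod] at h3
      omega
  generalize hrq : (f + t).tmod 2 = r at hchar hr hrsign
  have hp : PySem.Int.mod (t - f) 2 = (t - f) % 2 :=
    PySem.Int.mod_eq_emod_of_pos (by norm_num)
  rw [hp]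
  set p := (t - f) % 2 with hpdef
  have hpbound : p = 0 ∨ p = 1 := by omega
  by_cases hft : f ≤ t
  · -- main case: f ≤ mid ≤ t, split B's range at mid + 1
    have hmlo : f ≤ mid := by omega
    have hmhi : mid ≤ t := by omega
    rw [pv_phase_up (mid + 1 - f).toNat f (mid + 1) (mid - f) [] rfl]
    dsimp only
    rw [pv_phase_down (t + 1 - (mid + 1)).toNat (mid + 1) (t + 1) _ _ rfl]
    dsimp only
    rw [PySem.List.pyRange_one_append f (mid + 1) (t + 1) (by omega) (by omega)]
    rw [List.foldl_append]
    rw [PySem.List.foldl_append_eq_flatMap, PySem.List.foldl_append_eq_flatMap]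
    simp only [List.nil_append]
    congr 1
    · -- ascending half: count e + (i - f) = tent height
      apply pv_flatMap_congr_mem
      intro i hi
      rw [PySem.List.mem_pyRange_one] at hi
      congr 1
      omega
    · -- descending half
      apply pv_flatMap_congr_mem
      intro i hi
      rw [PySem.List.mem_pyRange_one] at hi
      have hcount : (if p = 0 then mid - f + ((mid + 1 - f).toNat : Int) - 2
            else mid - f + ((mid + 1 - f).toNat : Int) - 1) - (i - (mid + 1))
          = 2 * (mid - f) - max (max (mid - i) (i - mid - p)) 0 := by
        rcases hpbound with hp' | hp' <;> rw [hp'] <;> omega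
      rw [hcount]
  · -- degenerate case t < f: both sides are []
    have hmlo : t ≤ mid := by omega
    have hmhi : mid ≤ f := by omega
    rw [pv_phase_up (mid + 1 - f).toNat f (mid + 1) (mid - f) [] rfl]
    dsimp only
    rw [PySem.List.pyRange_one_eq_nil (a := mid + 1) (b := t + 1) (by omega)]
    rw [PySem.List.pyRange_one_eq_nil (a := f) (b := t + 1) (by omega)]
    simp only [List.nil_append, List.foldl_nil]
    apply pv_flatMap_nil
    intro i hi
    rw [PySem.List.mem_pyRange_one] at hi
    have : (mid - f + (i - f)).toNat = 0 := by omega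
    rw [this]
    rfl
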